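-- pv_equiv track=rewrite | github.com/Zhicheng-wan/ScholarRAG-Workbench | scripts/chunking&cleaning/make_v9.py | minimal_quality_check
-- ===== SOURCE A (Python) =====
-- def minimal_quality_check(text: str) -> bool:
--     """v7's lenient quality check."""
--     if len(text) < 20:
--         return False
--     if sum(c.isalpha() for c in text) < 10:
--         return False
--     if len(text.split()) < 3:
--         return False
--     return True
-- ===== SOURCE B (Python) =====
-- def minimal_quality_check(text: str) -> bool:
--     """Single pass: running length, alpha and word-start counters instead of three scans."""
--     length = 0
--     alpha = 0
--     words = 0
--     in_word = False
--     for c in text: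
--         length += 1
--         if c.isalpha():
--             alpha += 1
--         if c.isspace():
--             in_word = False
--         else:
--             if not in_word:
--                 words += 1
--             in_word = True
--     return length >= 20 and alpha >= 10 and words >= 3
-- ===== Notes on version B (the rewrite author's own statement) =====
-- stated objective: alternative
-- what changed: Replaces A's three separate scans (len, a sum over isalpha, and len(text.split())) with one traversal of the characters keeping length/alpha/word-start counters and an in-word flag.
import Mathlib
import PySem

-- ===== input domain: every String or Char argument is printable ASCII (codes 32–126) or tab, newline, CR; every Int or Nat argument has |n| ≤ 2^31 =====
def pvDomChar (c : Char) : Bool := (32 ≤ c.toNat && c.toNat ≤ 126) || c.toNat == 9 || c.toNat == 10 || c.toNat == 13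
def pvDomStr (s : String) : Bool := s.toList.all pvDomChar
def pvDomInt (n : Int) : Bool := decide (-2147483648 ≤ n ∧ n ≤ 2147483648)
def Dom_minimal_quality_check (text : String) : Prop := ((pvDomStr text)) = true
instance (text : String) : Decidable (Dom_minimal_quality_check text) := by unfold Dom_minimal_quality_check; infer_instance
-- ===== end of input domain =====

-- B replaces A's three scans (len, alpha sum, len(text.split())) by one pass with running counters; same O(n) cost, different decomposition.


-- ===== PORT A =====
def minimal_quality_check (text : String) : Bool :=
  if PySem.Str.len text < 20 then false
  else if (text.toList.foldl (fun acc c => acc + (if PySem.Chars.isalpha c then (1 : Int) else 0)) 0) < 10 then false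
  else if (PySem.Str.split₀ text).length < 3 then false
  else true

-- ===== PORT B =====
def mqcStep (st : Int × Int × Int × Bool) (c : Char) : Int × Int × Int × Bool :=
  let l := st.1 + 1
  let a := if PySem.Chars.isalpha c then st.2.1 + 1 else st.2.1
  if PySem.Chars.isspace c then (l, a, st.2.2.1, false)
  else (l, a, (if st.2.2.2 then st.2.2.1 else st.2.2.1 + 1), true)

def minimal_quality_check_alt (text : String) : Bool :=
  let st := text.toList.foldl mqcStep (0, 0, 0, false)
  decide (20 ≤ st.1) && decide (10 ≤ st.2.1) && decide (3 ≤ st.2.2.1)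

-- ===== PRECONDITION & SPEC =====
def Spec_minimal_quality_check (text : String) (out : Bool) : Prop := out = minimal_quality_check_alt text
instance (text : String) (out : Bool) : Decidable (Spec_minimal_quality_check text out) := by unfold Spec_minimal_quality_check; infer_instance

-- ===== CLAIM (what is proved, stated in full; the proofs are below) =====
def Claim_equal_minimal_quality_check : Prop := ∀ (text : String), Dom_minimal_quality_check text → Spec_minimal_quality_check text (minimal_quality_check text)

-- ===== LEMMAS AND PROOFS =====

-- words counted by word ENDS (a pending word at eof counts), matching split₀.go
def pvWC : List Char → Bool → Nat
  | [], inw => if inw then 1 else 0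
  | c :: rest, inw =>
    if PySem.Chars.isspace c then (if inw then 1 else 0) + pvWC rest false
    else pvWC rest true

-- words counted by word STARTS, matching B's loop
def pvWS : List Char → Bool → Nat
  | [], _ => 0
  | c :: rest, inw =>
    if PySem.Chars.isspace c then pvWS rest false
    else (if inw then 0 else 1) + pvWS rest true

def pvA : List Char → Int
  | [] => 0
  | c :: rest => (if PySem.Chars.isalpha c then 1 else 0) + pvA rest

def pvFinw : List Char → Bool → Bool
  | [], inw => inw
  | c :: rest, _ => pvFinw rest (!PySem.Chars.isspace c)

theorem pv_go_len : ∀ (s cur : List Char) (accs : List (List Char)),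
    (PySem.Chars.split₀.go s cur accs).length = accs.length + pvWC s (!cur.isEmpty) := by
  intro s
  induction s with
  | nil =>
    intro cur accs
    cases cur
    · simp [PySem.Chars.split₀.go, pvWC]
    · simp [PySem.Chars.split₀.go, pvWC]
  | cons c rest ih =>
    intro cur accs
    by_cases hs : PySem.Chars.isspace c = true <;> cases cur <;>
      simp [PySem.Chars.split₀.go, pvWC, hs, ih] <;> omega

theorem pv_wc_eq : ∀ (s : List Char) (inw : Bool),
    pvWC s inw = pvWS s inw + (if inw then 1 else 0) := by
  intro s
  induction s with
  | nil => intro inw; simp [pvWC, pvWS]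
  | cons c rest ih =>
    intro inw
    by_cases h : PySem.Chars.isspace c = true <;> cases inw <;>
      simp [pvWC, pvWS, h, ih] <;> omega

theorem pv_foldl_alpha : ∀ (s : List Char) (a : Int),
    s.foldl (fun acc c => acc + (if PySem.Chars.isalpha c then (1 : Int) else 0)) a = a + pvA s := by
  intro s
  induction s with
  | nil => intro a; simp [pvA]
  | cons c rest ih =>
    intro a
    simp only [List.foldl_cons, ih, pvA]
    ring

theorem pv_foldB : ∀ (s : List Char) (l a w : Int) (inw : Bool),
    s.foldl mqcStep (l, a, w, inw) =
      (l + s.length, a + pvA s, w + pvWS s inw, pvFinw s inw) := by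
  intro s
  induction s with
  | nil => intro l a w inw; simp [pvA, pvWS, pvFinw]
  | cons c rest ih =>
    intro l a w inw
    simp only [List.foldl_cons]
    by_cases hs : PySem.Chars.isspace c = true <;>
      by_cases ha : PySem.Chars.isalpha c = true <;>
        cases inw <;>
          simp [mqcStep, hs, ha, ih, pvA, pvWS, pvFinw, Prod.mk.injEq] <;> omega

-- ===== VERDICT (by name: the statement is the Claim_ definition above) =====
theorem minimal_quality_check_spec : Claim_equal_minimal_quality_check := by
  intro text _
  unfold Spec_minimal_quality_check minimal_quality_check minimal_quality_check_alt
  have hB := pv_foldB text.toList 0 0 0 false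
  have hA := pv_foldl_alpha text.toList 0
  have hgo := pv_go_len text.toList [] []
  have hwc := pv_wc_eq text.toList false
  have hsplit : (PySem.Str.split₀ text).length = pvWS text.toList false := by
    simp [PySem.Str.split₀, PySem.Chars.split₀, hgo, hwc]
  have hlen : PySem.Str.len text = text.toList.length := by
    simp [PySem.Str.len]
  rw [hA, hsplit, hlen]
  simp only [hB]
  split_ifs with h1 h2 h3 <;> simp_all
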